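-- pv_equiv track=rewrite | github.com/Hong9915/algorithm | Python3/프로그래머스/1/135808. 과일 장수/과일 장수.py | solution
-- ===== SOURCE A (Python) =====
-- def solution(k, m, score):
--     score.sort(reverse=True)
--     total = 0
--
--     for i in range(0, len(score) - m + 1, m):
--         box = score[i:i + m]
--         min_score = box[-1]
--         total += min_score * m
--
--     return total
-- ===== SOURCE B (Python) =====
-- def solution(k, m, score):
--     # No full box can be formed when m <= 0.
--     if m <= 0:
--         return 0
--     # Ascending sort; the minimum of each descending m-box sits at ascending
--     # indices len % m, len % m + m, ... : one strided slice, no box loop.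
--     return m * sum(sorted(score)[len(score) % m::m])
-- ===== Notes on version B (the rewrite author's own statement) =====
-- stated objective: simpler
-- what changed: Replaces the descending sort plus explicit box loop (slice each m-box, read its last element) by an ascending sort and a single strided slice whose sum is multiplied by m once; B is a two-liner with no loop and no per-box slicing.
import Mathlib
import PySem

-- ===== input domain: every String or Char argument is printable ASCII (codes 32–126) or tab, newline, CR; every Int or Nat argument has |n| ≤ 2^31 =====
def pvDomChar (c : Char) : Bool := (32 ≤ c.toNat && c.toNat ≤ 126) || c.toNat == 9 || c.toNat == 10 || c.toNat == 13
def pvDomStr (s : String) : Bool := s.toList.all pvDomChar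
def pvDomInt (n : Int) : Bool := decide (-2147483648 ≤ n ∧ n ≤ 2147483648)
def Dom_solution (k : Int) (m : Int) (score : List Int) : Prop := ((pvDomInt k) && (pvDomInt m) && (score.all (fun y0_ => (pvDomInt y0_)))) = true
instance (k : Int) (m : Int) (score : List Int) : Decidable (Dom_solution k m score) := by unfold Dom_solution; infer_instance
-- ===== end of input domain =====

-- B replaces A's descending sort + per-box slicing loop by an ascending sort and one strided
-- slice summed once (objective: simpler). Python A sorts `score` in place; the equivalence
-- proved here is about the return value only.

-- ===== PORT A =====
def solution (k : Int) (m : Int) (score : List Int) : Int :=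
  let s := PySem.List.sorted score (fun x => x) true
  (PySem.List.pyRange 0 ((s.length : Int) - m + 1) m).foldl
    (fun total i =>
      let box := PySem.List.slice s (some i) (some (i + m))
      -- box[-1]; within Pre_ every box the loop reaches is nonempty, so the default 0 is unreachable
      let min_score := PySem.List.pyGetD box (-1) 0
      total + min_score * m) 0

-- ===== PORT B =====
def solution_alt (k : Int) (m : Int) (score : List Int) : Int :=
  if m ≤ 0 then 0
  else
    let s := PySem.List.sorted score (fun x => x) false
    -- sorted(score)[len(score) % m :: m]
    m * ((PySem.List.slice? s (some (PySem.Int.mod (s.length : Int) m)) none m).getD []).sum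

-- ===== PRECONDITION & SPEC =====
-- Pre_ excludes exactly m = 0, where Python A raises ValueError (range step 0).
def Pre_solution (k : Int) (m : Int) (score : List Int) : Prop := m ≠ 0
instance (k : Int) (m : Int) (score : List Int) : Decidable (Pre_solution k m score) := by unfold Pre_solution; infer_instance
def pvWitness_solution : Int × Int × List Int := (4, 2, [4, 1, 3, 2, 5])

def Spec_solution (k : Int) (m : Int) (score : List Int) (out : Int) : Prop := out = solution_alt k m score
instance (k : Int) (m : Int) (score : List Int) (out : Int) : Decidable (Spec_solution k m score out) := by unfold Spec_solution; infer_instance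

-- ===== CLAIM (what is proved, stated in full; the proofs are below) =====
def Claim_equal_solution : Prop := ∀ (k : Int) (m : Int) (score : List Int), Dom_solution k m score → Pre_solution k m score → Spec_solution k m score (solution k m score)

-- ===== LEMMAS AND PROOFS =====

-- Python's sorted(xs, reverse=True) on plain ints is, as a value list, the reverse of sorted(xs).
theorem pv_desc_eq_rev_asc (xs : List Int) :
    PySem.List.sorted xs (fun x => x) true = (PySem.List.sorted xs (fun x => x) false).reverse := by
  have h : PySem.List.sorted xs (fun x => x) false = (PySem.List.sorted xs (fun x => x) true).reverse := by
    apply PySem.List.sorted_id_eq_of_perm_of_pairwise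
    · exact (List.reverse_perm _).trans (PySem.List.sorted_perm xs (fun x => x) true)
    · exact (List.pairwise_reverse).2 (PySem.List.sorted_pairwise_rev xs (fun x => x))
  rw [h, List.reverse_reverse]

-- filterMap of in-range lookups is a plain map (getD's default is never used)
theorem pv_filterMap_getElem?_eq_map (a : List Int) (f : Nat → Nat) (l : List Nat)
    (h : ∀ k ∈ l, f k < a.length) :
    List.filterMap (fun k => a[f k]?) l = l.map (fun k => a.getD (f k) 0) := by
  induction l with
  | nil => rfl
  | cons x t ih =>
    have hx : f x < a.length := h x (List.mem_cons_self)
    have ht := ih (fun k hk => h k (List.mem_cons_of_mem _ hk))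
    simp [ht, List.getD_eq_getElem?_getD, List.getElem?_eq_getElem hx]

theorem pv_sum_map_range_eq (f : Nat → Int) (n : Nat) :
    ((List.range n).map f).sum = ∑ j ∈ Finset.range n, f j := rfl

-- A's loop over descending m-boxes, as a sum over ascending indices r, r+m, …
theorem pv_A_loop_eq (a : List Int) (mn : Nat) (hm : 1 ≤ mn) :
    (PySem.List.pyRange 0 ((a.length : Int) - (mn : Int) + 1) (mn : Int)).foldl
      (fun total i =>
        total + (PySem.List.pyGetD (PySem.List.slice a.reverse (some i) (some (i + (mn : Int)))) (-1) 0) * (mn : Int)) 0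
    = (mn : Int) * ((List.range (a.length / mn)).map (fun j => ((a.getD (a.length % mn + mn * j) 0 : Int)))).sum := by
  have hmZ : (0 : Int) < (mn : Int) := by exact_mod_cast hm
  set n := a.length with hnd
  set q := n / mn with hqd
  set r := n % mn with hrd
  have hn : mn * q + r = n := Nat.div_add_mod n mn
  have hr : r < mn := Nat.mod_lt _ hm
  rw [PySem.List.pyRange_of_pos _ _ hmZ]
  have hcount : (if (0 : Int) < ((n : Int) - (mn : Int) + 1) then
      (((n : Int) - (mn : Int) + 1 - 0 + (mn : Int) - 1) / (mn : Int)).toNat else 0) = q := by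
    by_cases hc : mn ≤ n
    · rw [if_pos (by omega)]
      have h2 : ((n : Int) - (mn : Int) + 1 - 0 + (mn : Int) - 1) = (n : Int) := by ring
      rw [h2, ← Int.natCast_div, Int.toNat_natCast]
    · rw [if_neg (by omega)]
      exact (Nat.div_eq_of_lt (by omega)).symm
  rw [hcount, List.foldl_map, PySem.List.foldl_add, zero_add]
  have hpt : ∀ kk ∈ List.range q,
      (PySem.List.pyGetD (PySem.List.slice a.reverse (some ((0 : Int) + (mn : Int) * (kk : Int)))
        (some ((0 : Int) + (mn : Int) * (kk : Int) + (mn : Int)))) (-1) 0) * (mn : Int)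
      = (a.getD (r + mn * (q - 1 - kk)) 0) * (mn : Int) := by
    intro kk hkk
    have hk : kk < q := List.mem_range.mp hkk
    have hkb : mn * kk + mn ≤ n := by
      have h1 : mn * (kk + 1) ≤ mn * q := Nat.mul_le_mul_left mn hk
      have h2 : mn * (kk + 1) = mn * kk + mn := by ring
      have h3 : mn * q ≤ n := by omega
      omega
    have e1 : ((0 : Int) + (mn : Int) * (kk : Int)) = ((mn * kk : Nat) : Int) := by push_cast; ring
    rw [e1, PySem.List.slice_natCast_add]
    set box := List.take mn (List.drop (mn * kk) a.reverse) with hbox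
    have hlen : box.length = mn := by
      simp [hbox, List.length_take, List.length_drop]
      omega
    have hlast : PySem.List.pyGet? box (-1) = box.getLast? := PySem.List.pyGet?_neg_one box
    have hidx : mn * kk + (mn - 1) < a.reverse.length := by
      simp only [List.length_reverse]
      omega
    have hbval : box.getLast? = a.reverse[mn * kk + (mn - 1)]? := by
      rw [List.getLast?_eq_getElem?, hlen]
      rw [hbox, List.getElem?_take_of_lt (by omega), List.getElem?_drop]
    have hrev : a.reverse[mn * kk + (mn - 1)]? = a[n - 1 - (mn * kk + (mn - 1))]? :=
      List.getElem?_reverse (by simpa using hidx)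
    have hprod : mn * kk + mn * (q - 1 - kk) + mn = mn * q := by
      have hq : kk + (q - 1 - kk) + 1 = q := by omega
      calc mn * kk + mn * (q - 1 - kk) + mn = mn * (kk + (q - 1 - kk) + 1) := by ring
        _ = mn * q := by rw [hq]
    have hix : n - 1 - (mn * kk + (mn - 1)) = r + mn * (q - 1 - kk) := by omega
    simp only [PySem.List.pyGetD, hlast, hbval, hrev, hix, List.getD_eq_getElem?_getD]
  rw [List.map_congr_left hpt, List.sum_map_mul_right, pv_sum_map_range_eq,
    Finset.sum_range_reflect (fun j => a.getD (r + mn * j) 0) q, ← pv_sum_map_range_eq]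
  ring

-- B's strided slice sorted(score)[r::m] is exactly the list of those ascending box minima
theorem pv_B_slice_eq (a : List Int) (mn : Nat) (hm : 1 ≤ mn) :
    ((PySem.List.slice? a (some ((a.length % mn : Nat) : Int)) none (mn : Int)).getD [])
    = (List.range (a.length / mn)).map (fun j => a.getD (a.length % mn + mn * j) 0) := by
  have hmZ : (0 : Int) < (mn : Int) := by exact_mod_cast hm
  set n := a.length with hnd
  set q := n / mn with hqd
  set r := n % mn with hrd
  have hn : mn * q + r = n := Nat.div_add_mod n mn
  have hr : r < mn := Nat.mod_lt _ hm
  unfold PySem.List.slice? PySem.List.sliceIndices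
  simp only [← hnd]
  rw [if_neg (by omega : ¬ (mn : Int) = 0)]
  have hstep : ¬ ((mn : Int) < 0) := by omega
  simp only [if_neg hstep, if_pos hmZ]
  have hclamp1 : ¬ ((r : Int) < 0) := by omega
  have hclamp2 : min (r : Int) (n : Int) = (r : Int) := by
    have : r ≤ n := Nat.mod_le _ _
    omega
  simp only [if_neg hclamp1, hclamp2]
  have hcount : (if (r : Int) < (n : Int) then (((n : Int) - (r : Int) + (mn : Int) - 1) / (mn : Int)).toNat else 0) = q := by
    by_cases hc : r < n
    · rw [if_pos (by exact_mod_cast hc)]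
      have hnr : (n : Int) - (r : Int) = (mn : Int) * (q : Int) := by
        have := hn; push_cast [← this]; ring
      have hd : ((n : Int) - (r : Int) + (mn : Int) - 1) = ((mn : Int) - 1) + (q : Int) * (mn : Int) := by
        rw [hnr]; ring
      rw [hd, Int.add_mul_ediv_right _ _ (by omega : (mn : Int) ≠ 0),
        Int.ediv_eq_zero_of_lt (by omega) (by omega), zero_add, Int.toNat_natCast]
    · rw [if_neg (by exact_mod_cast hc)]
      have : n = r := by omega
      exact (Nat.div_eq_of_lt (by omega)).symm
  rw [hcount]
  have harg : ∀ kk : Nat, ((r : Int) + (mn : Int) * (kk : Int)).toNat = r + mn * kk := by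
    intro kk
    have : ((r : Int) + (mn : Int) * (kk : Int)) = ((r + mn * kk : Nat) : Int) := by push_cast; ring
    rw [this, Int.toNat_natCast]
  have hbody : (fun kk : Nat => a[((r : Int) + (mn : Int) * (kk : Int)).toNat]?)
      = (fun kk : Nat => a[r + mn * kk]?) := by
    funext kk; rw [harg]
  rw [hbody]
  apply pv_filterMap_getElem?_eq_map
  intro kk hkk
  have hk : kk < q := List.mem_range.mp hkk
  have h1 : mn * (kk + 1) ≤ mn * q := Nat.mul_le_mul_left mn hk
  have h2 : mn * (kk + 1) = mn * kk + mn := by ring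
  omega

-- ===== VERDICT (by name: the statement is the Claim_ definition above) =====
theorem solution_spec : Claim_equal_solution := by
  intro k m score _ hpre
  show solution k m score = solution_alt k m score
  rcases lt_trichotomy m 0 with hm | hm | hm
  · -- m < 0 : A's range is empty, B's guard returns 0
    have hle : m ≤ 0 := le_of_lt hm
    simp only [solution, solution_alt, if_pos hle]
    have hlen := Int.natCast_nonneg ((PySem.List.sorted score (fun x => x) true).length)
    have hempty : PySem.List.pyRange 0 (((PySem.List.sorted score (fun x => x) true).length : Int) - m + 1) m = [] := by
      unfold PySem.List.pyRange
      rw [if_neg hpre, if_neg (by omega : ¬ (0 : Int) < m), if_neg (by omega : ¬ (((PySem.List.sorted score (fun x => x) true).length : Int) - m + 1 < 0))]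
      rfl
    rw [hempty]
    rfl
  · exact absurd hm hpre
  · -- 0 < m
    obtain ⟨mn, rfl⟩ : ∃ mn : Nat, m = (mn : Int) := ⟨m.toNat, (Int.toNat_of_nonneg hm.le).symm⟩
    have hmn : 1 ≤ mn := by exact_mod_cast hm
    simp only [solution, solution_alt, if_neg (by omega : ¬ (mn : Int) ≤ 0)]
    rw [pv_desc_eq_rev_asc, List.length_reverse, PySem.Int.mod_natCast]
    rw [pv_A_loop_eq _ mn hmn, pv_B_slice_eq _ mn hmn]
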